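-- pv_equiv track=rewrite | github.com/kbruhadesh/DSA | 3818-minimum-prefix-removal-to-make-array-strictly-increasing/3818-minimum-prefix-removal-to-make-array-strictly-increasing.py | minimumPrefixLength
-- ===== SOURCE A (Python) =====
-- from typing import List
--
-- def minimumPrefixLength(nums: List[int]) -> int:
--     n = len(nums)
--     j = n-1
--
--     while j>0 and nums[j-1]<nums[j]:
--         j -= 1
--
--     if j == 0:
--         return 0
--
--     rem = j
--     i=0
--
--     while i<j:
--         if i > 0 and nums[i] <= nums[i-1]:
--             break
--         temp=j
--         while temp<n and nums[i]>= nums[temp]: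
--             temp += 1
--         if temp < n:
--             rem = min(rem,temp)
--         i += 1
--     return rem
-- ===== SOURCE B (Python) =====
-- from typing import List
--
-- def minimumPrefixLength(nums: List[int]) -> int:
--     # single forward pass: the answer is (index of the last adjacent non-increase) + 1, else 0
--     ans = 0
--     for i in range(1, len(nums)):
--         if nums[i-1] >= nums[i]:
--             ans = i
--     return ans
-- ===== Notes on version B (the rewrite author's own statement) =====
-- stated objective: simpler
-- what changed: Replaces A's backward suffix scan plus nested prefix/suffix merge loops (whose min never changes the result) with one plain forward pass recording the position after the last adjacent non-increase.
-- intended difference: On the empty list A returns -1 (its j = n-1 sentinel falls through), which is not a valid removal length; B returns 0, the intended answer since an empty array is already strictly increasing. — e.g. on minimumPrefixLength([]): A returns -1, B returns 0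
import Mathlib
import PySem

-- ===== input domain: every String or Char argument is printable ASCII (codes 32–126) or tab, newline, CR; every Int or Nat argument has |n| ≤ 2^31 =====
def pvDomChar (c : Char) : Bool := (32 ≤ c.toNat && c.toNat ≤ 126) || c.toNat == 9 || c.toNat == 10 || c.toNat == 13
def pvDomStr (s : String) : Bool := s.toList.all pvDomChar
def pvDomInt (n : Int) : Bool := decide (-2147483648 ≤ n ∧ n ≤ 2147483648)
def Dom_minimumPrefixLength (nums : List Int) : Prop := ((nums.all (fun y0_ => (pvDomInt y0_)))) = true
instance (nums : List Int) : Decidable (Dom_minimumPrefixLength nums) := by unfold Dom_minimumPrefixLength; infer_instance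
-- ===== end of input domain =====

-- B is a single forward pass; A additionally runs redundant nested loops.  A = B except on [].

-- ===== PORT A =====
-- every index A reads is in range on the reached states, so pyGetD _ _ 0 is exact here
def pvG (nums : List Int) (i : Int) : Int := PySem.List.pyGetD nums i 0

-- while j>0 and nums[j-1]<nums[j]: j -= 1
def pvLoopJ (nums : List Int) (j : Int) : Nat → Int
  | 0 => j
  | fuel+1 => if j > 0 ∧ pvG nums (j-1) < pvG nums j then pvLoopJ nums (j-1) fuel else j

-- while temp<n and nums[i]>=nums[temp]: temp += 1   (x = nums[i])
def pvLoopTemp (nums : List Int) (n x temp : Int) : Nat → Int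
  | 0 => temp
  | fuel+1 => if temp < n ∧ x ≥ pvG nums temp then pvLoopTemp nums n x (temp+1) fuel else temp

-- the outer while i<j loop of A
def pvLoopI (nums : List Int) (n j rem i : Int) : Nat → Int
  | 0 => rem
  | fuel+1 =>
    if i < j then
      if i > 0 ∧ pvG nums i ≤ pvG nums (i-1) then rem
      else
        let temp := pvLoopTemp nums n (pvG nums i) j n.toNat
        let rem' := if temp < n then min rem temp else rem
        pvLoopI nums n j rem' (i+1) fuel
    else rem

def minimumPrefixLength (nums : List Int) : Int :=
  let n : Int := nums.length
  let j := pvLoopJ nums (n-1) nums.length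
  if j = 0 then 0
  else pvLoopI nums n j j 0 nums.length

-- ===== PORT B =====
def minimumPrefixLength_alt (nums : List Int) : Int :=
  (PySem.List.pyRange 1 nums.length 1).foldl
    (fun ans i => if pvG nums (i-1) ≥ pvG nums i then i else ans) 0

-- ===== PRECONDITION & SPEC =====
-- On the empty list A returns -1 (its j = n-1 sentinel falls through), which is not a valid
-- removal length; B returns 0, the intended answer (an empty array is already strictly increasing).
def D_minimumPrefixLength (nums : List Int) : Prop := nums = []
instance (nums : List Int) : Decidable (D_minimumPrefixLength nums) := by unfold D_minimumPrefixLength; infer_instance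

def Spec_minimumPrefixLength (nums : List Int) (out : Int) : Prop := ¬ D_minimumPrefixLength nums → out = minimumPrefixLength_alt nums
instance (nums : List Int) (out : Int) : Decidable (Spec_minimumPrefixLength nums out) := by unfold Spec_minimumPrefixLength; infer_instance

def pvDiffWitness_minimumPrefixLength : List Int := []
def pvDiffWitnessOut_minimumPrefixLength : Int × Int := (-1, 0)

-- ===== CLAIM (what is proved, stated in full; the proofs are below) =====
def Claim_unchanged_minimumPrefixLength : Prop := ∀ (nums : List Int), Dom_minimumPrefixLength nums → Spec_minimumPrefixLength nums (minimumPrefixLength nums)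
def Claim_changed_minimumPrefixLength : Prop := Dom_minimumPrefixLength (pvDiffWitness_minimumPrefixLength) ∧ D_minimumPrefixLength (pvDiffWitness_minimumPrefixLength) ∧ minimumPrefixLength (pvDiffWitness_minimumPrefixLength) = pvDiffWitnessOut_minimumPrefixLength.1 ∧ minimumPrefixLength_alt (pvDiffWitness_minimumPrefixLength) = pvDiffWitnessOut_minimumPrefixLength.2 ∧ pvDiffWitnessOut_minimumPrefixLength.1 ≠ pvDiffWitnessOut_minimumPrefixLength.2
def Claim_exact_minimumPrefixLength : Prop := ∀ (nums : List Int), Dom_minimumPrefixLength nums → D_minimumPrefixLength nums → minimumPrefixLength nums ≠ minimumPrefixLength_alt nums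

-- ===== LEMMAS AND PROOFS =====

-- a "stopping point" of the backward scan, relative to a right bound m
def pvStop (nums : List Int) (m : Int) (j : Int) : Prop :=
  0 ≤ j ∧ j < m ∧
  (∀ k : Int, j ≤ k → k + 1 < m → pvG nums k < pvG nums (k+1)) ∧
  (j = 0 ∨ pvG nums (j-1) ≥ pvG nums j)

theorem pvStop_unique {nums : List Int} {m j1 j2 : Int}
    (h1 : pvStop nums m j1) (h2 : pvStop nums m j2) : j1 = j2 := by
  obtain ⟨a1, b1, c1, d1⟩ := h1
  obtain ⟨a2, b2, c2, d2⟩ := h2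
  by_contra hne
  rcases lt_or_gt_of_ne hne with h | h
  · rcases d2 with h0 | hv
    · omega
    · have hx := c1 (j2 - 1) (by omega) (by omega)
      have e : j2 - 1 + 1 = j2 := by omega
      rw [e] at hx; omega
  · rcases d1 with h0 | hv
    · omega
    · have hx := c2 (j1 - 1) (by omega) (by omega)
      have e : j1 - 1 + 1 = j1 := by omega
      rw [e] at hx; omega

theorem pvLoopJ_stop (nums : List Int) (fuel : Nat) (j : Int)
    (hj0 : 0 ≤ j) (hjn : j < (nums.length : Int))
    (hfuel : j ≤ (fuel : Int))
    (hgood : ∀ k : Int, j ≤ k → k + 1 < (nums.length : Int) → pvG nums k < pvG nums (k+1)) :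
    pvStop nums (nums.length : Int) (pvLoopJ nums j fuel) := by
  induction fuel generalizing j with
  | zero =>
    simp only [pvLoopJ]
    exact ⟨hj0, hjn, hgood, Or.inl (by omega)⟩
  | succ f ih =>
    simp only [pvLoopJ]
    split
    · next h =>
      exact ih (j-1) (by omega) (by omega) (by omega) (by
        intro k hk hk2
        rcases eq_or_lt_of_le hk with heq | h2
        · have e : k + 1 = j := by omega
          have e2 : k = j - 1 := by omega
          rw [e, e2]; exact h.2
        · exact hgood k (by omega) hk2)
    · next h =>
      refine ⟨hj0, hjn, hgood, ?_⟩
      by_cases hz : j = 0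
      · exact Or.inl hz
      · push Not at h
        exact Or.inr (h (by omega))

theorem pvLoopTemp_ge (nums : List Int) (n x : Int) (fuel : Nat) (temp : Int) :
    temp ≤ pvLoopTemp nums n x temp fuel := by
  induction fuel generalizing temp with
  | zero => simp [pvLoopTemp]
  | succ f ih =>
    simp only [pvLoopTemp]
    split
    · exact le_trans (by omega) (ih (temp+1))
    · omega

theorem pvLoopI_const (nums : List Int) (n j : Int) (fuel : Nat) (i : Int) :
    pvLoopI nums n j j i fuel = j := by
  induction fuel generalizing i with
  | zero => simp [pvLoopI]
  | succ f ih =>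
    simp only [pvLoopI]
    split
    · split
      · rfl
      · have hge := pvLoopTemp_ge nums n (pvG nums i) n.toNat j
        have hmin : min j (pvLoopTemp nums n (pvG nums i) j n.toNat) = j := by omega
        simp only [hmin]
        split <;> exact ih (i+1)
    · rfl

-- the forward fold over range(1, m) yields a stopping point for bound m
theorem pvFold_stop (nums : List Int) (m : Int) (hm : 1 ≤ m) (_hmn : m ≤ (nums.length : Int)) :
    pvStop nums m ((PySem.List.pyRange 1 m 1).foldl
      (fun ans i => if pvG nums (i-1) ≥ pvG nums i then i else ans) 0) := by
  have h1 : ∀ t : Nat, 1 + (t : Int) ≤ m →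
      pvStop nums (1 + (t : Int)) ((PySem.List.pyRange 1 (1 + (t : Int)) 1).foldl
        (fun ans i => if pvG nums (i-1) ≥ pvG nums i then i else ans) 0) := by
    intro t
    induction t with
    | zero =>
      intro _
      rw [PySem.List.pyRange_one_eq_nil (by omega)]
      simp only [List.foldl_nil]
      refine ⟨le_refl 0, by omega, ?_, Or.inl rfl⟩
      intro k hk hk2; omega
    | succ s ih =>
      intro hle
      have hsplit : PySem.List.pyRange 1 (1 + ((s+1 : Nat) : Int)) 1
          = PySem.List.pyRange 1 (1 + (s : Int)) 1 ++ [1 + (s : Int)] := by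
        have : (1 : Int) + ((s+1 : Nat) : Int) = (1 + (s : Int)) + 1 := by push_cast; ring
        rw [this, PySem.List.pyRange_one_succ_right (by omega)]
      rw [hsplit, List.foldl_append]
      obtain ⟨a0, b0, c0, d0⟩ := ih (by push_cast at hle ⊢; omega)
      simp only [List.foldl_cons, List.foldl_nil]
      split
      · next hv =>
        refine ⟨by omega, by push_cast; omega, ?_, Or.inr (by simpa using hv)⟩
        intro k hk hk2
        push_cast at hk2
        omega
      · next hv =>
        push Not at hv
        refine ⟨a0, by push_cast; omega, ?_, d0⟩
        intro k hk hk2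
        push_cast at hk2
        by_cases hlast : k + 1 = 1 + (s : Int)
        · have hk1 : k = (s:Int) := by omega
          subst hk1
          have e1 : (1:Int) + (s:Int) - 1 = (s:Int) := by omega
          have e2 : (1:Int) + (s:Int) = (s:Int) + 1 := by omega
          rw [e1, e2] at hv
          exact hv
        · exact c0 k hk (by omega)
  have h2 := h1 (m - 1).toNat (by omega)
  have he : (1 : Int) + ((m-1).toNat : Int) = m := by omega
  rw [he] at h2
  exact h2

theorem pvA_eq_B (nums : List Int) (h : nums ≠ []) :
    minimumPrefixLength nums = minimumPrefixLength_alt nums := by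
  have hn : 1 ≤ (nums.length : Int) := by
    have := List.length_pos_iff.mpr h; omega
  have hA := pvLoopJ_stop nums nums.length ((nums.length : Int) - 1)
    (by omega) (by omega) (by omega) (by intro k hk hk2; omega)
  have hB := pvFold_stop nums (nums.length : Int) hn (le_refl _)
  have heq := pvStop_unique hA hB
  unfold minimumPrefixLength minimumPrefixLength_alt
  simp only
  rw [heq]
  split
  · next h0 => omega
  · next h0 => exact pvLoopI_const nums _ _ _ 0

-- ===== VERDICT (by name: the statement is the Claim_ definition above) =====
theorem minimumPrefixLength_spec : Claim_unchanged_minimumPrefixLength := by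
  intro nums _ hD
  exact (pvA_eq_B nums hD).symm ▸ rfl

theorem minimumPrefixLength_changed : Claim_changed_minimumPrefixLength := by
  unfold Claim_changed_minimumPrefixLength; decide

theorem minimumPrefixLength_tight : Claim_exact_minimumPrefixLength := by
  intro nums _ hD
  subst hD
  decide
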